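-- pv_equiv track=rewrite | github.com/akanksha-th/financial-news-intelligence | src/agents/entity_extraction_agent.py | _clean_subword_tokens
-- ===== SOURCE A (Python) =====
-- def _clean_subword_tokens(token_str: str) -> str:
--     """
--     If NER left merged strings like '##E' or 'Hyun ##dai' this attempts to reconstruct.
--     Input may already be a full string; if it's tokenized into wordpiece artifacts,
--     this tries to remove '##' fragments sensibly.
--     """
--     if not token_str:
--         return token_str
--     # If token contains '##' pieces or multiple spaces, fix naively:
--     # e.g. "Hyun ##dai Motor" -> "Hyundai Motor"
--     parts = token_str.split()
--     out_parts = []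
--     for p in parts:
--         if p.startswith("##"):
--             if out_parts:
--                 out_parts[-1] = out_parts[-1] + p[2:]
--             else:
--                 # leading ##, just append cleaned
--                 out_parts.append(p[2:])
--         else:
--             out_parts.append(p)
--     return " ".join(out_parts).strip()
-- ===== SOURCE B (Python) =====
-- def _clean_subword_tokens(token_str: str) -> str:
--     """Reconstruct wordpiece subwords by whole-string substitution instead of a
--     per-token accumulator loop."""
--     if not token_str:
--         return token_str
--     text = " ".join(token_str.split())
--     if text.startswith("##"):
--         text = text[2:]
--     text = text.replace(" ##", "")
--     return text.lstrip()
-- ===== Notes on version B (the rewrite author's own statement) =====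
-- stated objective: simpler
-- what changed: Replaces the per-token accumulator loop (with last-element mutation) by normalizing whitespace once via join-of-split, stripping one leading subword marker, merging every remaining space-separated subword fragment with a single whole-string substitution, and finishing with a left strip.
import Mathlib
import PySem

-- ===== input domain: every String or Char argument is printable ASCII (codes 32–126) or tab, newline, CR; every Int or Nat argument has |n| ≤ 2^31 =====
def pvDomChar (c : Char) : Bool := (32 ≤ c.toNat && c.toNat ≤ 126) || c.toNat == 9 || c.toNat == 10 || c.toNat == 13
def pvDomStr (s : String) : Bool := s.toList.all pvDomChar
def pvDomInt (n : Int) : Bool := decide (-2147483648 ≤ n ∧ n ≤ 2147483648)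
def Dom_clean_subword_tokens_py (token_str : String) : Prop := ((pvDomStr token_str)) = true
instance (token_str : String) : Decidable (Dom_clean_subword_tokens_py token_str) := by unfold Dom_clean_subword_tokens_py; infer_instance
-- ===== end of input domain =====

-- B replaces A's per-token accumulator loop by one whole-string substitution that merges the
-- space-separated subword fragments, after stripping a single leading marker (objective: simpler).

-- ===== PORT A =====
-- one loop step: if p.startswith('##'): out_parts[-1] += p[2:] (or append p[2:] if out_parts empty) else append p
def pvStepA (acc : List (List Char)) (p : List Char) : List (List Char) :=
  if PySem.Chars.startswith p ['#', '#'] then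
    if acc ≠ [] then
      PySem.List.pySetD acc (-1) (PySem.List.pyGetD acc (-1) [] ++ PySem.Chars.slice p (some 2) none)
    else
      acc ++ [PySem.Chars.slice p (some 2) none]
  else
    acc ++ [p]

def clean_subword_tokens_py (token_str : String) : String :=
  if token_str = "" then token_str
  else
    let parts := PySem.Chars.split₀ token_str.toList
    let out_parts := parts.foldl pvStepA []
    String.ofList (PySem.Chars.strip (PySem.Chars.join [' '] out_parts))

-- ===== PORT B =====
def clean_subword_tokens_py_alt (token_str : String) : String :=
  if token_str = "" then token_str
  else
    let text0 := PySem.Chars.join [' '] (PySem.Chars.split₀ token_str.toList)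
    let text1 := if PySem.Chars.startswith text0 ['#', '#'] then PySem.Chars.slice text0 (some 2) none else text0
    let text2 := PySem.Chars.replace text1 [' ', '#', '#'] []
    String.ofList (PySem.Chars.lstrip text2)

-- ===== PRECONDITION & SPEC =====
def Spec_clean_subword_tokens_py (token_str : String) (out : String) : Prop := out = clean_subword_tokens_py_alt token_str
instance (token_str : String) (out : String) : Decidable (Spec_clean_subword_tokens_py token_str out) := by unfold Spec_clean_subword_tokens_py; infer_instance

-- ===== CLAIM (what is proved, stated in full; the proofs are below) =====
def Claim_equal_clean_subword_tokens_py : Prop := ∀ (token_str : String), Dom_clean_subword_tokens_py token_str → Spec_clean_subword_tokens_py token_str (clean_subword_tokens_py token_str)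

-- ===== LEMMAS AND PROOFS =====

-- a char list is space-free
def pvNoSpace (l : List Char) : Prop := ∀ c ∈ l, PySem.Chars.isspace c = false
-- every element is a nonempty space-free word
def pvWords (ps : List (List Char)) : Prop := ∀ p ∈ ps, p ≠ [] ∧ pvNoSpace p

-- the word-level meaning of A's loop: glue '##'-tokens onto the current word
def pvMerge (cur : List Char) : List (List Char) → List (List Char)
  | [] => [cur]
  | q :: rest =>
    if PySem.Chars.startswith q ['#', '#'] then pvMerge (cur ++ q.drop 2) rest
    else cur :: pvMerge q rest

-- replace s " ##" "" as a structural recursion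
def pvRrep : List Char → List Char
  | [] => []
  | c :: t =>
    if ([' ', '#', '#'] : List Char).isPrefixOf (c :: t) then pvRrep ((c :: t).drop 3)
    else c :: pvRrep t
termination_by l => l.length
decreasing_by
  · simp only [List.drop_succ_cons, List.length_cons, List.length_drop]; omega
  · simp

-- ' '-separated tail of a join
def pvSep : List (List Char) → List Char
  | [] => []
  | y :: ys => ' ' :: PySem.Chars.join [' '] (y :: ys)

theorem pv_join_tail (x : List Char) (xs : List (List Char)) :
    PySem.Chars.join [' '] (x :: xs) = x ++ pvSep xs := by
  cases xs with
  | nil => simp [pvSep, PySem.Chars.join_singleton]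
  | cons y ys => simp [pvSep, PySem.Chars.join_cons_cons]

theorem pv_sep_shape (xs : List (List Char)) : pvSep xs = [] ∨ ∃ T', pvSep xs = ' ' :: T' := by
  cases xs <;> simp [pvSep]

theorem pv_split₀_go_words (s cur : List Char) (acc : List (List Char))
    (hcur : pvNoSpace cur) (hacc : ∀ p ∈ acc, p ≠ [] ∧ pvNoSpace p) :
    ∀ p ∈ PySem.Chars.split₀.go s cur acc, p ≠ [] ∧ pvNoSpace p := by
  induction s generalizing cur acc with
  | nil =>
    simp only [PySem.Chars.split₀.go]
    split
    · intro p hp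
      rw [List.mem_reverse] at hp
      exact hacc p hp
    · rename_i hemp
      intro p hp
      rw [List.mem_reverse, List.mem_cons] at hp
      rcases hp with h | h
      · subst h
        refine ⟨by simpa using hemp, ?_⟩
        intro c hc
        exact hcur c (by simpa using hc)
      · exact hacc p h
  | cons c s ih =>
    simp only [PySem.Chars.split₀.go]
    split
    · rename_i hsp
      split
      · exact ih [] acc (by intro c hc; simp at hc) hacc
      · rename_i hemp
        refine ih [] (cur.reverse :: acc) (by intro c hc; simp at hc) ?_
        intro p hp
        rcases List.mem_cons.mp hp with h | h
        · subst h
          refine ⟨by simpa using hemp, ?_⟩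
          intro d hd
          exact hcur d (by simpa using hd)
        · exact hacc p h
    · rename_i hsp
      refine ih (c :: cur) acc ?_ hacc
      intro d hd
      rcases List.mem_cons.mp hd with h | h
      · subst h; simpa using hsp
      · exact hcur d h

theorem pv_split₀_words (s : List Char) : pvWords (PySem.Chars.split₀ s) := by
  intro p hp
  exact pv_split₀_go_words s [] [] (by intro c hc; simp at hc) (by intro q hq; simp at hq) p hp

theorem pv_pySetD_last {α : Type} (xs : List α) (x v : α) :
    PySem.List.pySetD (xs ++ [x]) (-1) v = xs ++ [v] := by
  have hidx : PySem.List.pyIdx? (xs ++ [x]).length (-1) = some xs.length := by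
    simp [PySem.List.pyIdx?]
  simp only [PySem.List.pySetD, PySem.List.pySet?, hidx, Option.map_some, Option.getD_some]
  induction xs with
  | nil => simp
  | cons c cs ih => simpa using ih

theorem pv_foldl_merge (ts : List (List Char)) (acc₀ : List (List Char)) (w : List Char) :
    List.foldl pvStepA (acc₀ ++ [w]) ts = acc₀ ++ pvMerge w ts := by
  induction ts generalizing acc₀ w with
  | nil => simp [pvMerge]
  | cons q ts ih =>
    simp only [List.foldl_cons]
    by_cases hq : PySem.Chars.startswith q ['#', '#'] = true
    · have hstep : pvStepA (acc₀ ++ [w]) q = acc₀ ++ [w ++ q.drop 2] := by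
        simp only [pvStepA, hq, if_pos, if_true]
        rw [if_pos (by simp)]
        rw [PySem.List.pyGetD_neg_one_append_singleton]
        have h2 : PySem.Chars.slice q (some 2) none = q.drop 2 := by
          simp only [PySem.Chars.slice_eq_listSlice]
          rw [PySem.List.slice_from q (show (0:Int) ≤ 2 by norm_num)]
          rfl
        rw [h2, pv_pySetD_last]
      rw [hstep, ih acc₀ (w ++ q.drop 2)]
      simp [pvMerge, hq]
    · have hstep : pvStepA (acc₀ ++ [w]) q = (acc₀ ++ [w]) ++ [q] := by
        simp only [pvStepA]
        rw [if_neg (by simpa using hq)]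
      rw [hstep, ih (acc₀ ++ [w]) q]
      simp [pvMerge, hq]

theorem pv_replace_go_eq (fuel : Nat) (l acc : List Char) (h : l.length ≤ fuel) :
    PySem.Chars.replace.go [' ', '#', '#'] [] fuel l acc = acc.reverse ++ pvRrep l := by
  induction fuel generalizing l acc with
  | zero =>
    have : l = [] := by
      cases l with
      | nil => rfl
      | cons c t => simp at h
    subst this
    simp [PySem.Chars.replace.go, pvRrep]
  | succ fuel ih =>
    cases l with
    | nil => simp [PySem.Chars.replace.go, pvRrep]
    | cons c t =>
      simp only [PySem.Chars.replace.go]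
      by_cases hpre : ([' ', '#', '#'] : List Char).isPrefixOf (c :: t) = true
      · rw [if_pos hpre]
        have hlen : (List.drop ([' ', '#', '#'] : List Char).length (c :: t)).length ≤ fuel := by
          simp only [List.length_drop, List.length_cons] at *
          omega
        rw [ih _ _ hlen]
        have : pvRrep (c :: t) = pvRrep ((c :: t).drop 3) := by
          rw [pvRrep]; rw [if_pos hpre]
        rw [this]
        simp
      · rw [if_neg hpre]
        have hlen : t.length ≤ fuel := by
          simp only [List.length_cons] at h; omega
        rw [ih _ _ hlen]
        have : pvRrep (c :: t) = c :: pvRrep t := by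
          rw [pvRrep]; rw [if_neg hpre]
        rw [this]
        simp

theorem pv_replace_eq (s : List Char) : PySem.Chars.replace s [' ', '#', '#'] [] = pvRrep s := by
  simp only [PySem.Chars.replace]
  rw [if_neg (by simp)]
  simpa using pv_replace_go_eq s.length s [] (le_refl _)

theorem pv_rrep_append_nospace (w t : List Char) (hw : pvNoSpace w) :
    pvRrep (w ++ t) = w ++ pvRrep t := by
  induction w with
  | nil => simp
  | cons c w ih =>
    have hc : PySem.Chars.isspace c = false := hw c (by simp)
    have hcs : c ≠ ' ' := by
      intro hteq
      subst hteq
      have : PySem.Chars.isspace ' ' = true := by decide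
      rw [this] at hc; exact absurd hc (by simp)
    have hpre : ([' ', '#', '#'] : List Char).isPrefixOf (c :: (w ++ t)) = false := by
      simp [List.isPrefixOf]
      intro hsp
      exact absurd hsp.symm hcs
    rw [List.cons_append, pvRrep, if_neg (by simp [hpre])]
    rw [ih (by intro d hd; exact hw d (by simp [hd]))]
    simp

theorem pv_hh_prefix_append (q T : List Char) (hq : q ≠ []) (hT : T = [] ∨ ∃ T', T = ' ' :: T') :
    (['#', '#'] : List Char).isPrefixOf (q ++ T) = (['#', '#'] : List Char).isPrefixOf q := by
  cases q with
  | nil => exact absurd rfl hq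
  | cons c q' =>
    cases q' with
    | nil =>
      rcases hT with h | ⟨T', h⟩ <;> subst h
      · simp [List.isPrefixOf]
      · simp [List.isPrefixOf]
    | cons c2 q'' => simp [List.isPrefixOf]

theorem pv_of_hh_prefix (q : List Char) (h : (['#', '#'] : List Char).isPrefixOf q = true) :
    ∃ q₂, q = '#' :: '#' :: q₂ := by
  cases q with
  | nil => simp [List.isPrefixOf] at h
  | cons c q' =>
    cases q' with
    | nil => simp [List.isPrefixOf] at h
    | cons c2 q'' =>
      simp [List.isPrefixOf] at h
      exact ⟨q'', by rw [← h.1, ← h.2]⟩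

theorem pv_merge_ne_nil (rest : List (List Char)) (w : List Char) : pvMerge w rest ≠ [] := by
  induction rest generalizing w with
  | nil => simp [pvMerge]
  | cons q r ih =>
    simp only [pvMerge]
    split
    · exact ih _
    · simp

theorem pv_join_merge_append (rest : List (List Char)) (a b : List Char) :
    PySem.Chars.join [' '] (pvMerge (a ++ b) rest) = a ++ PySem.Chars.join [' '] (pvMerge b rest) := by
  induction rest generalizing b with
  | nil => simp [pvMerge, PySem.Chars.join_singleton]
  | cons q r ih =>
    simp only [pvMerge]
    split
    · rw [List.append_assoc]
      exact ih (b ++ q.drop 2)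
    · obtain ⟨m, ms, hm⟩ := List.exists_cons_of_ne_nil (pv_merge_ne_nil r q)
      rw [hm, PySem.Chars.join_cons_cons, PySem.Chars.join_cons_cons]
      simp [List.append_assoc]

theorem pv_rrep_join (rest : List (List Char)) (w : List Char)
    (hw : pvNoSpace w) (hr : pvWords rest) :
    pvRrep (PySem.Chars.join [' '] (w :: rest)) = PySem.Chars.join [' '] (pvMerge w rest) := by
  induction rest generalizing w with
  | nil =>
    have := pv_rrep_append_nospace w [] hw
    simp only [List.append_nil] at this
    simp [pvMerge, PySem.Chars.join_singleton, this, pvRrep]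
  | cons q r ih =>
    obtain ⟨hqne, hqns⟩ := hr q (by simp)
    have hr' : pvWords r := fun p hp => hr p (by simp [hp])
    rw [PySem.Chars.join_cons_cons]
    rw [List.append_assoc]
    have hJ : ([' '] : List Char) ++ PySem.Chars.join [' '] (q :: r) = ' ' :: PySem.Chars.join [' '] (q :: r) := by simp
    rw [hJ, pv_rrep_append_nospace w _ hw]
    by_cases hsw : PySem.Chars.startswith q ['#', '#'] = true
    · have hpf : (['#', '#'] : List Char).isPrefixOf q = true := by
        simpa [PySem.Chars.startswith] using hsw
      obtain ⟨q₂, hq2⟩ := pv_of_hh_prefix q hpf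
      have hq₂ns : pvNoSpace q₂ := by
        intro d hd; exact hqns d (by simp [hq2, hd])
      have hdrop : pvRrep (' ' :: PySem.Chars.join [' '] (q :: r)) =
          pvRrep (PySem.Chars.join [' '] (q₂ :: r)) := by
        rw [pv_join_tail q r, hq2]
        rw [show (' ' :: (('#' :: '#' :: q₂) ++ pvSep r)) = ' ' :: '#' :: '#' :: (q₂ ++ pvSep r) by simp]
        rw [pvRrep, if_pos (by simp [List.isPrefixOf])]
        rw [pv_join_tail q₂ r]
        simp
      rw [hdrop, ih q₂ hq₂ns hr']
      simp only [pvMerge]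
      rw [if_pos hsw]
      rw [show q.drop 2 = q₂ by rw [hq2]; rfl]
      rw [pv_join_merge_append r w q₂]
    · have hswf : PySem.Chars.startswith q ['#', '#'] = false := by
        rwa [Bool.not_eq_true] at hsw
      have hpf : (['#', '#'] : List Char).isPrefixOf q = false := by
        simp only [PySem.Chars.startswith] at hswf
        exact hswf
      have hpre : ([' ', '#', '#'] : List Char).isPrefixOf (' ' :: PySem.Chars.join [' '] (q :: r)) = false := by
        have hstep : ([' ', '#', '#'] : List Char).isPrefixOf (' ' :: PySem.Chars.join [' '] (q :: r)) =
            (['#', '#'] : List Char).isPrefixOf (PySem.Chars.join [' '] (q :: r)) := by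
          simp [List.isPrefixOf]
        rw [hstep, pv_join_tail q r, pv_hh_prefix_append q (pvSep r) hqne (pv_sep_shape r)]
        exact hpf
      rw [pvRrep, if_neg (by simp [hpre])]
      rw [ih q hqns hr']
      simp only [pvMerge]
      rw [if_neg hsw]
      obtain ⟨m, ms, hm⟩ := List.exists_cons_of_ne_nil (pv_merge_ne_nil r q)
      rw [hm, PySem.Chars.join_cons_cons]
      simp

theorem pv_merge_spec (rest : List (List Char)) (w : List Char)
    (hw : pvNoSpace w) (hr : pvWords rest) :
    (∀ x ∈ pvMerge w rest, pvNoSpace x) ∧ (∀ x ∈ (pvMerge w rest).tail, x ≠ []) ∧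
      (∃ u, (pvMerge w rest).head? = some (w ++ u)) := by
  induction rest generalizing w with
  | nil =>
    refine ⟨by intro x hx; simp [pvMerge] at hx; subst hx; exact hw, by simp [pvMerge], ⟨[], by simp [pvMerge]⟩⟩
  | cons q r ih =>
    obtain ⟨hqne, hqns⟩ := hr q (by simp)
    have hr' : pvWords r := fun p hp => hr p (by simp [hp])
    simp only [pvMerge]
    split
    · have hdw : pvNoSpace (w ++ q.drop 2) := by
        intro d hd
        rcases List.mem_append.mp hd with h | h
        · exact hw d h
        · exact hqns d (List.mem_of_mem_drop h)
      obtain ⟨h1, h2, u, hu⟩ := ih (w ++ q.drop 2) hdw hr'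
      exact ⟨h1, h2, ⟨q.drop 2 ++ u, by rw [hu]; simp [List.append_assoc]⟩⟩
    · obtain ⟨h1, h2, u, hu⟩ := ih q hqns hr'
      obtain ⟨m, ms, hm⟩ := List.exists_cons_of_ne_nil (pv_merge_ne_nil r q)
      refine ⟨?_, ?_, ⟨[], by simp⟩⟩
      · intro x hx
        rcases List.mem_cons.mp hx with h | h
        · subst h; exact hw
        · exact h1 x h
      · intro x hx
        simp only [List.tail_cons] at hx
        rw [hm] at hx
        rcases List.mem_cons.mp hx with h | h
        · subst h
          rw [hm] at hu
          simp only [List.head?_cons, Option.some.injEq] at hu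
          subst hu
          intro hc
          exact hqne (List.append_eq_nil_iff.mp hc).1
        · rw [hm] at h2
          exact h2 x (by simpa using h)

theorem pv_rstrip_nospace (l : List Char) (hl : pvNoSpace l) : PySem.Chars.rstrip l = l := by
  have aux : ∀ m : List Char, (∀ c ∈ m, PySem.Chars.isspace c = false) →
      List.dropWhile PySem.Chars.isspace m = m := by
    intro m hm
    cases m with
    | nil => rfl
    | cons c t => simp [List.dropWhile_cons, hm c (by simp)]
  simp only [PySem.Chars.rstrip]
  rw [aux l.reverse (by intro c hc; exact hl c (by simpa using hc))]
  simp

theorem pv_rstrip_append (x y : List Char) (hy : PySem.Chars.rstrip y = y) (hne : y ≠ []) :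
    PySem.Chars.rstrip (x ++ y) = x ++ y := by
  obtain ⟨c, ys, hc⟩ := List.exists_cons_of_ne_nil (show y.reverse ≠ [] by simpa using hne)
  have hself : List.dropWhile PySem.Chars.isspace y.reverse = y.reverse := by
    have := hy
    simp only [PySem.Chars.rstrip] at this
    have h2 := congrArg List.reverse this
    simpa using h2
  have hcs : PySem.Chars.isspace c = false := by
    by_contra hcc
    rw [hc, List.dropWhile_cons, if_pos (by simpa using hcc)] at hself
    have hlen := List.length_dropWhile_le (p := PySem.Chars.isspace) (l := ys)
    have := congrArg List.length hself
    simp at this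
    omega
  simp only [PySem.Chars.rstrip, List.reverse_append]
  rw [hc, List.cons_append, List.dropWhile_cons, if_neg (by simp [hcs])]
  rw [← List.cons_append, ← hc]
  simp

theorem pv_strip_eq_lstrip (x : List Char) (hx : PySem.Chars.rstrip x = x) :
    PySem.Chars.strip x = PySem.Chars.lstrip x := by
  simp only [PySem.Chars.strip, PySem.Chars.lstrip]
  set y := List.dropWhile PySem.Chars.isspace x with hy
  cases hyn : y with
  | nil => simp [PySem.Chars.rstrip, PySem.Chars.lstrip, hyn]
  | cons d ds =>
    have hsplit : List.takeWhile PySem.Chars.isspace x ++ y = x := List.takeWhile_append_dropWhile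
    have hyne : y ≠ [] := by simp [hyn]
    -- from rstrip x = x and x = t ++ y with y ≠ [], deduce rstrip y = y
    obtain ⟨c, ys, hc⟩ := List.exists_cons_of_ne_nil (show y.reverse ≠ [] by simpa using hyne)
    have hxself : List.dropWhile PySem.Chars.isspace x.reverse = x.reverse := by
      have h2 := congrArg List.reverse hx
      simp only [PySem.Chars.rstrip] at h2
      simpa using h2
    have hxr : x.reverse = c :: (ys ++ (List.takeWhile PySem.Chars.isspace x).reverse) := by
      conv_lhs => rw [← hsplit]
      rw [List.reverse_append, hc]
      simp
    have hcs : PySem.Chars.isspace c = false := by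
      by_contra hcc
      rw [hxr, List.dropWhile_cons, if_pos (by simpa using hcc)] at hxself
      have hlen := List.length_dropWhile_le (p := PySem.Chars.isspace)
        (l := ys ++ (List.takeWhile PySem.Chars.isspace x).reverse)
      have h1 := congrArg List.length hxself
      rw [List.length_cons] at h1
      omega
    have : PySem.Chars.rstrip y = y := by
      simp only [PySem.Chars.rstrip]
      rw [hc, List.dropWhile_cons, if_neg (by simp [hcs]), ← hc]
      simp
    rw [← hyn]
    exact this

theorem pv_rstrip_join (ws : List (List Char)) (h1 : ∀ p ∈ ws, pvNoSpace p)
    (h2 : ∀ p ∈ ws.tail, p ≠ []) :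
    PySem.Chars.rstrip (PySem.Chars.join [' '] ws) = PySem.Chars.join [' '] ws := by
  induction ws with
  | nil => simp [PySem.Chars.join_nil, PySem.Chars.rstrip]
  | cons hd tl ih =>
    cases tl with
    | nil =>
      rw [PySem.Chars.join_singleton]
      exact pv_rstrip_nospace hd (h1 hd (by simp))
    | cons q tl' =>
      rw [PySem.Chars.join_cons_cons]
      have hqne : q ≠ [] := h2 q (by simp)
      have hJne : PySem.Chars.join [' '] (q :: tl') ≠ [] := by
        rw [pv_join_tail q tl']
        intro hc
        exact hqne (List.append_eq_nil_iff.mp hc).1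
      have hJ : PySem.Chars.rstrip (PySem.Chars.join [' '] (q :: tl')) =
          PySem.Chars.join [' '] (q :: tl') := by
        refine ih ?_ ?_
        · intro p hp; exact h1 p (by simp [hp])
        · intro p hp
          simp only [List.tail_cons] at hp ⊢
          exact h2 p (by simp [hp])
      exact pv_rstrip_append (hd ++ [' ']) _ hJ hJne

-- ===== VERDICT (by name: the statement is the Claim_ definition above) =====
theorem clean_subword_tokens_py_spec : Claim_equal_clean_subword_tokens_py := by
  intro token_str _
  unfold Spec_clean_subword_tokens_py
  by_cases h0 : token_str = ""
  · simp [clean_subword_tokens_py, clean_subword_tokens_py_alt, h0]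
  · simp only [clean_subword_tokens_py, clean_subword_tokens_py_alt, if_neg h0]
    cases hp : PySem.Chars.split₀ token_str.toList with
    | nil =>
      simp [hp, PySem.Chars.join_nil, PySem.Chars.startswith, List.isPrefixOf,
        pv_replace_eq, pvRrep, PySem.Chars.strip, PySem.Chars.lstrip, PySem.Chars.rstrip]
    | cons p rest =>
      have hwords := pv_split₀_words token_str.toList
      rw [hp] at hwords
      obtain ⟨hpne, hpns⟩ := hwords p (by simp)
      have hrest : pvWords rest := fun x hx => hwords x (by simp [hx])
      rw [List.foldl_cons]
      have hs2L : ∀ l : List Char, PySem.List.slice l (some 2) none = l.drop 2 := by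
        intro l
        rw [PySem.List.slice_from l (show (0:Int) ≤ 2 by norm_num)]
        rfl
      have hs2 : ∀ l : List Char, PySem.Chars.slice l (some 2) none = l.drop 2 := by
        intro l
        simp only [PySem.Chars.slice_eq_listSlice]
        exact hs2L l
      by_cases hsw : PySem.Chars.startswith p ['#', '#'] = true
      · have hpf : (['#', '#'] : List Char).isPrefixOf p = true := by
          simpa [PySem.Chars.startswith] using hsw
        obtain ⟨p₂, hp2⟩ := pv_of_hh_prefix p hpf
        have hp₂ns : pvNoSpace p₂ := by intro d hd; exact hpns d (by simp [hp2, hd])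
        -- A side
        have hstep : pvStepA [] p = [p.drop 2] := by
          simp [pvStepA, hsw, hs2L]
        rw [hstep]
        have hfold := pv_foldl_merge rest [] (p.drop 2)
        simp only [List.nil_append] at hfold
        rw [hfold]
        -- B side
        have hsw0 : PySem.Chars.startswith (PySem.Chars.join [' '] (p :: rest)) ['#', '#'] = true := by
          simp only [PySem.Chars.startswith]
          rw [pv_join_tail p rest, pv_hh_prefix_append p (pvSep rest) hpne (pv_sep_shape rest)]
          exact hpf
        rw [if_pos hsw0, hs2]
        have hdrop2 : (PySem.Chars.join [' '] (p :: rest)).drop 2 = PySem.Chars.join [' '] (p₂ :: rest) := by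
          rw [pv_join_tail p rest, pv_join_tail p₂ rest, hp2]
          simp
        rw [hdrop2, pv_replace_eq, pv_rrep_join rest p₂ hp₂ns hrest]
        have hpd : p.drop 2 = p₂ := by rw [hp2]; simp
        rw [hpd]
        obtain ⟨hm1, hm2, _⟩ := pv_merge_spec rest p₂ hp₂ns hrest
        rw [pv_strip_eq_lstrip _ (pv_rstrip_join _ hm1 hm2)]
      · -- A side
        have hstep : pvStepA [] p = [p] := by
          simp [pvStepA, hsw]
        rw [hstep]
        have hfold := pv_foldl_merge rest [] p
        simp only [List.nil_append] at hfold
        rw [hfold]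
        -- B side
        have hswf : PySem.Chars.startswith p ['#', '#'] = false := by
          rwa [Bool.not_eq_true] at hsw
        have hpf : (['#', '#'] : List Char).isPrefixOf p = false := by
          simp only [PySem.Chars.startswith] at hswf
          exact hswf
        have hsw0 : PySem.Chars.startswith (PySem.Chars.join [' '] (p :: rest)) ['#', '#'] = false := by
          simp only [PySem.Chars.startswith]
          rw [pv_join_tail p rest, pv_hh_prefix_append p (pvSep rest) hpne (pv_sep_shape rest)]
          exact hpf
        rw [if_neg (by simp [hsw0]), pv_replace_eq, pv_rrep_join rest p hpns hrest]
        obtain ⟨hm1, hm2, _⟩ := pv_merge_spec rest p hpns hrest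
        rw [pv_strip_eq_lstrip _ (pv_rstrip_join _ hm1 hm2)]
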